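-- pv_equiv track=rewrite | github.com/jinhyuk9714/songsim-campus-mcp | src/songsim_campus/services.py | _period_end_minutes
-- ===== SOURCE A (Python) =====
-- CLASS_PERIODS = [
--     (1, "09:00", "09:50"),
--     (2, "10:00", "10:50"),
--     (3, "11:00", "11:50"),
--     (4, "12:00", "12:50"),
--     (5, "13:00", "13:50"),
--     (6, "14:00", "14:50"),
--     (7, "15:00", "15:50"),
--     (8, "16:00", "16:50"),
--     (9, "17:00", "17:50"),
--     (10, "18:00", "18:50"),
-- ]
--
-- def _period_end_minutes(period: int | None) -> int | None:
--     if period is None: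
--         return None
--     for item_period, _, end in CLASS_PERIODS:
--         if item_period == period:
--             hour, minute = end.split(":")
--             return int(hour) * 60 + int(minute)
--     return None
-- ===== SOURCE B (Python) =====
-- def _period_end_minutes(period):
--     if period is None:
--         return None
--     if period in frozenset(range(1, 11)):
--         return (8 + int(period)) * 60 + 50
--     return None
-- ===== Notes on version B (the rewrite author's own statement) =====
-- stated objective: simpler
-- what changed: Replaces the table scan plus end-time string parsing with a range check and the closed form (8 + period) * 60 + 50.
import Mathlib
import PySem

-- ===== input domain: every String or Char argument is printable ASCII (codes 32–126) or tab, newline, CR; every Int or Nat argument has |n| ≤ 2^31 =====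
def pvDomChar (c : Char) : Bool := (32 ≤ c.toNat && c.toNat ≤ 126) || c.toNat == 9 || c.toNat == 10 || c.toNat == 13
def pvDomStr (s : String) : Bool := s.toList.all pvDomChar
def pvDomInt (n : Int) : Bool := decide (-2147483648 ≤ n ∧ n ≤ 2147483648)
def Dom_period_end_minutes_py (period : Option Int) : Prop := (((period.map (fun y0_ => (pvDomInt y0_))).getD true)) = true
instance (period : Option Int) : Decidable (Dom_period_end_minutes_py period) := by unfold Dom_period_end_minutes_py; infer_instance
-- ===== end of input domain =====

-- B replaces A's table scan and end-time string parsing by a range check and the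
-- closed form (8 + period) * 60 + 50 (objective: simpler).

-- ===== PORT A =====
def pvClassPeriods : List (Int × String × String) :=
  [(1, "09:00", "09:50"), (2, "10:00", "10:50"), (3, "11:00", "11:50"),
   (4, "12:00", "12:50"), (5, "13:00", "13:50"), (6, "14:00", "14:50"),
   (7, "15:00", "15:50"), (8, "16:00", "16:50"), (9, "17:00", "17:50"),
   (10, "18:00", "18:50")]

-- the 'for' loop over CLASS_PERIODS; 'hour, minute = end.split(":")' destructures a
-- 2-element split ('.getD 0' is unreachable on the table's literal times, where the
-- split always has two int-parsable fields, so the port is exact there)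
def pvLoopA : List (Int × String × String) → Int → Option Int
  | [], _ => none
  | (item_period, _, e) :: rest, period =>
    if item_period = period then
      let parts := (PySem.Str.split? e ":").getD []
      some (((PySem.Int.ofStr? (List.getD parts 0 "")).getD 0) * 60 +
            ((PySem.Int.ofStr? (List.getD parts 1 "")).getD 0))
    else pvLoopA rest period

def period_end_minutes_py (period : Option Int) : Option Int :=
  match period with
  | none => none
  | some p => pvLoopA pvClassPeriods p

-- ===== PORT B =====
def period_end_minutes_py_alt (period : Option Int) : Option Int :=
  match period with
  | none => none
  | some p => if 1 ≤ p ∧ p ≤ 10 then some ((8 + p) * 60 + 50) else none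

-- ===== PRECONDITION & SPEC =====
def Spec_period_end_minutes_py (period : Option Int) (out : Option Int) : Prop := out = period_end_minutes_py_alt period
instance (period : Option Int) (out : Option Int) : Decidable (Spec_period_end_minutes_py period out) := by unfold Spec_period_end_minutes_py; infer_instance

-- ===== CLAIM (what is proved, stated in full; the proofs are below) =====
def Claim_equal_period_end_minutes_py : Prop := ∀ (period : Option Int), Dom_period_end_minutes_py period → Spec_period_end_minutes_py period (period_end_minutes_py period)

-- ===== LEMMAS AND PROOFS =====
theorem pvLoopA_eval (p : Int) :
    pvLoopA pvClassPeriods p =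
      if 1 ≤ p ∧ p ≤ 10 then some ((8 + p) * 60 + 50) else none := by
  by_cases h : 1 ≤ p ∧ p ≤ 10
  · obtain ⟨h1, h2⟩ := h
    interval_cases p <;> simp [pvLoopA, pvClassPeriods] <;> decide
  · simp only [pvLoopA, pvClassPeriods, if_neg h]
    split_ifs <;> first | rfl | omega

-- ===== VERDICT (by name: the statement is the Claim_ definition above) =====
theorem period_end_minutes_py_spec : Claim_equal_period_end_minutes_py := by
  intro period _
  unfold Spec_period_end_minutes_py period_end_minutes_py period_end_minutes_py_alt
  cases period with
  | none => rfl
  | some p => exact pvLoopA_eval p
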